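-- pv_equiv track=rewrite | github.com/JayChao0331/EEC-289A---Final-Project | read_data/read_shakespeare.py | validate_text
-- ===== SOURCE A (Python) =====
-- def validate_text(all_works_sentences):
--     valid = True
--     for work_sentences in all_works_sentences:
--         for sentence in work_sentences:
--             if not all(char in 'abcdefghijklmnopqrstuvwxyz ' for char in sentence):
--                 valid = False
--                 return valid
--     return valid
-- ===== SOURCE B (Python) =====
-- def validate_text(all_works_sentences):
--     allowed = set('abcdefghijklmnopqrstuvwxyz ')
--     joined = ''.join(s for ws in all_works_sentences for s in ws)
--     return set(joined) <= allowed
-- ===== Notes on version B (the rewrite author's own statement) =====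
-- stated objective: idiomatic
-- what changed: Replaces the nested per-character loops with early return by one ''.join of all sentences and a single set-subset test set(joined) <= allowed over distinct characters.
import Mathlib
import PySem

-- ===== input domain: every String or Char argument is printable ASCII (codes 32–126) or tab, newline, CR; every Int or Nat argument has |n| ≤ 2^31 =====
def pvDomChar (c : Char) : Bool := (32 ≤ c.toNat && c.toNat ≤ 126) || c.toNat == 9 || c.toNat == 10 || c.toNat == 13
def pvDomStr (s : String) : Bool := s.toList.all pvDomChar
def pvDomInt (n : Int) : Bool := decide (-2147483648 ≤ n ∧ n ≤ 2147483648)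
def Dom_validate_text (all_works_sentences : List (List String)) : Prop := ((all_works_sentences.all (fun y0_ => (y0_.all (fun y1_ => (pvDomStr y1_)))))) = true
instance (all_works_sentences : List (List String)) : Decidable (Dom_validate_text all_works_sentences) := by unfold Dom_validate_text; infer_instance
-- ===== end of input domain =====

-- B replaces A's nested loops with an early return by one join of all sentences and a set-subset test; objective: idiomatic.

-- ===== PORT A =====
-- inner loop 'for sentence in work_sentences: if not all(...): return False'
def validate_text_work : List String → Bool
  | [] => true
  | sentence :: rest =>
      if !(sentence.toList.all (fun char => "abcdefghijklmnopqrstuvwxyz ".toList.contains char)) then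
        false
      else validate_text_work rest

def validate_text (all_works_sentences : List (List String)) : Bool :=
  validate_text_go all_works_sentences
where
  validate_text_go : List (List String) → Bool
    | [] => true  -- 'return valid' with valid still True
    | work_sentences :: rest =>
        if validate_text_work work_sentences then validate_text_go rest
        else false  -- 'valid = False; return valid'

-- ===== PORT B =====
def validate_text_alt (all_works_sentences : List (List String)) : Bool :=
  let allowed : PySem.Set Char := PySem.Set.ofList "abcdefghijklmnopqrstuvwxyz ".toList
  let joined : List Char :=
    ((all_works_sentences.flatMap (fun ws => ws)).map String.toList).flatten  -- ''.join(...)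
  PySem.Set.issubset (PySem.Set.ofList joined) allowed

-- ===== PRECONDITION & SPEC =====
def Spec_validate_text (all_works_sentences : List (List String)) (out : Bool) : Prop := out = validate_text_alt all_works_sentences
instance (all_works_sentences : List (List String)) (out : Bool) : Decidable (Spec_validate_text all_works_sentences out) := by unfold Spec_validate_text; infer_instance

-- ===== CLAIM (what is proved, stated in full; the proofs are below) =====
def Claim_equal_validate_text : Prop := ∀ (all_works_sentences : List (List String)), Dom_validate_text all_works_sentences → Spec_validate_text all_works_sentences (validate_text all_works_sentences)

-- ===== LEMMAS AND PROOFS =====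

theorem validate_text_work_eq (ws : List String) :
    validate_text_work ws
      = ws.all (fun s => s.toList.all (fun c => "abcdefghijklmnopqrstuvwxyz ".toList.contains c)) := by
  induction ws with
  | nil => rfl
  | cons s rest ih =>
      rw [validate_text_work, List.all_cons, ih]
      cases h : (s.toList.all fun c => "abcdefghijklmnopqrstuvwxyz ".toList.contains c)
      · rfl
      · rfl

theorem validate_text_eq (l : List (List String)) :
    validate_text l
      = l.all (fun ws => ws.all (fun s => s.toList.all (fun c => "abcdefghijklmnopqrstuvwxyz ".toList.contains c))) := by
  unfold validate_text
  induction l with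
  | nil => rfl
  | cons ws rest ih =>
      rw [validate_text.validate_text_go, List.all_cons, ← validate_text_work_eq]
      cases h : validate_text_work ws
      · rfl
      · exact ih

theorem validate_text_alt_eq (l : List (List String)) :
    validate_text_alt l
      = l.all (fun ws => ws.all (fun s => s.toList.all (fun c => "abcdefghijklmnopqrstuvwxyz ".toList.contains c))) := by
  rw [Bool.eq_iff_iff]
  simp only [validate_text_alt, PySem.Set.issubset_iff, List.all_eq_true,
    List.contains_iff_mem, PySem.Set.mem_ofList, List.mem_flatten, List.mem_map,
    List.mem_flatMap]
  constructor
  · intro h ws hws s hs c hc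
    exact h c ⟨s.toList, ⟨s, ⟨ws, hws, hs⟩, rfl⟩, hc⟩
  · rintro h c ⟨_, ⟨s, ⟨ws, hws, hs⟩, rfl⟩, hc⟩
    exact h ws hws s hs c hc

-- ===== VERDICT (by name: the statement is the Claim_ definition above) =====
theorem validate_text_spec : Claim_equal_validate_text := by
  intro l _
  unfold Spec_validate_text
  rw [validate_text_eq, validate_text_alt_eq]
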